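-- pv_equiv track=rewrite | github.com/michaelyhuang/cs50-exercises | dna/dna.py | countLongestSTR
-- ===== SOURCE A (Python) =====
-- def countLongestSTR(s, substr):
--     # Counts longest chain of strSEQ in dna sequence
--     # The idea is to start a counter each time strSeq is encountered
--     # Cut the substr or single letter off s to "move on"
--     # Count the number of repetitions until s is ''
--     counter = 0
--     maxCount = 0
--     inChain = False # Keep track of if the cut string comes off a repeat sequence
--     while len(s) > 0:
--         if s.startswith(substr):
--             counter += 1
--             inChain = True
--             maxCount = max(maxCount, counter)
--             s = s[len(substr):]
--         else:
--             maxCount = max(maxCount, counter)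
--             counter = 0
--             inChain = False
--             s = s[1:]
--     return maxCount
-- ===== SOURCE B (Python) =====
-- def countLongestSTR(s, substr):
--     # Index-based scan: no string copying at all. At each candidate position,
--     # count the whole aligned chain in an inner loop, then jump past it.
--     m = len(substr)
--     n = len(s)
--     best = 0
--     i = 0
--     while i < n:
--         if s.startswith(substr, i):
--             c = 0
--             j = i
--             while s.startswith(substr, j):
--                 c += 1
--                 j += m
--             best = max(best, c)
--             i = j + 1
--         else:
--             i += 1
--     return best
-- ===== Notes on version B (the rewrite author's own statement) =====
-- stated objective: faster
-- what changed: A repeatedly copies shrinking suffixes (s = s[1:] / s = s[len(substr):]) while carrying a run counter across iterations; B never copies: it walks an index with s.startswith(substr, i), counts each whole aligned chain in an inner loop and jumps past it.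
import Mathlib
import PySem

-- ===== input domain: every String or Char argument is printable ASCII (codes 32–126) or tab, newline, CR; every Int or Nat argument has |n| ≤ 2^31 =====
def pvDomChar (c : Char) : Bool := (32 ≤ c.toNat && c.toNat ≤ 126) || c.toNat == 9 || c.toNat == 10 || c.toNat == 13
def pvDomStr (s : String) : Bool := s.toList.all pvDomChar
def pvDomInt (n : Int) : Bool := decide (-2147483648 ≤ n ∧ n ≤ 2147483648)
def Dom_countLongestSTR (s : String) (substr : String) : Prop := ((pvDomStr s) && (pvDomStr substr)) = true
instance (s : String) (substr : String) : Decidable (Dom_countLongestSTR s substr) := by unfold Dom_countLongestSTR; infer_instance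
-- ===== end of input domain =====

-- B replaces A's suffix-copying greedy pass (s = s[1:] / s[len(substr):]) by an index walk that
-- counts each whole aligned chain in an inner loop and jumps past it; same return value, faster.

-- ===== PORT A =====
-- A's while loop; fuel = |s| + 1 suffices whenever the Python loop terminates (substr ≠ '' or s = '').
def pvALoop (substr : List Char) (fuel : Nat) (s : List Char) (counter maxCount : Int) (inChain : Bool) : Int :=
  match fuel with
  | 0 => maxCount
  | fuel + 1 =>
    if 0 < s.length then
      if PySem.Chars.startswith s substr then
        pvALoop substr fuel (PySem.List.slice s (some (substr.length : Int)) none)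
          (counter + 1) (max maxCount (counter + 1)) true
      else
        pvALoop substr fuel (PySem.List.slice s (some 1) none)
          0 (max maxCount counter) false
    else maxCount

def countLongestSTR (s : String) (substr : String) : Int :=
  pvALoop substr.toList (s.toList.length + 1) s.toList 0 0 false

-- ===== PORT B =====
-- B's inner while: count consecutive aligned occurrences starting at j.
-- s.startswith(substr, j) is exactly startswith of the suffix s[j:].
def pvBChain (substr : List Char) (fuel : Nat) (s : List Char) (j : Nat) (c : Int) : Int × Nat :=
  match fuel with
  | 0 => (c, j)
  | fuel + 1 =>
    if PySem.Chars.startswith (s.drop j) substr then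
      pvBChain substr fuel s (j + substr.length) (c + 1)
    else (c, j)

-- B's outer while over the start index i.
def pvBOuter (substr : List Char) (fuel : Nat) (s : List Char) (i : Nat) (best : Int) : Int :=
  match fuel with
  | 0 => best
  | fuel + 1 =>
    if i < s.length then
      if PySem.Chars.startswith (s.drop i) substr then
        let p := pvBChain substr (s.length + 1) s i 0
        pvBOuter substr fuel s (p.2 + 1) (max best p.1)
      else
        pvBOuter substr fuel s (i + 1) best
    else best

def countLongestSTR_alt (s : String) (substr : String) : Int :=
  pvBOuter substr.toList (s.toList.length + 1) s.toList 0 0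

-- ===== PRECONDITION & SPEC =====
-- Pre_ excludes only substr = '' with s ≠ '': there the Python A (and B) loops forever, returning nothing.
def Pre_countLongestSTR (s : String) (substr : String) : Prop := substr ≠ "" ∨ s = ""
instance (s : String) (substr : String) : Decidable (Pre_countLongestSTR s substr) := by
  unfold Pre_countLongestSTR; infer_instance

def pvWitness_countLongestSTR : String × String := ("ACGACGT", "ACG")

def Spec_countLongestSTR (s : String) (substr : String) (out : Int) : Prop := out = countLongestSTR_alt s substr
instance (s : String) (substr : String) (out : Int) : Decidable (Spec_countLongestSTR s substr out) := by
  unfold Spec_countLongestSTR; infer_instance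

-- ===== CLAIM (what is proved, stated in full; the proofs are below) =====
def Claim_equal_countLongestSTR : Prop := ∀ (s : String) (substr : String), Dom_countLongestSTR s substr → Pre_countLongestSTR s substr → Spec_countLongestSTR s substr (countLongestSTR s substr)

-- ===== LEMMAS AND PROOFS =====

-- Length of the greedy aligned chain of m at the head of s (m ≠ [] for termination).
def pvChain (m : List Char) (hm : m ≠ []) (s : List Char) : Nat :=
  if h : m <+: s then pvChain m hm (s.drop m.length) + 1 else 0
termination_by s.length
decreasing_by
  have h1 : m.length ≤ s.length := h.length_le
  have h2 : 0 < m.length := List.length_pos_iff.mpr hm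
  simp only [List.length_drop]; omega

-- Reference value: max over the positions the greedy pass visits.
def pvRef (m : List Char) (hm : m ≠ []) (s : List Char) : Int :=
  if hs : s = [] then 0
  else if m <+: s then
    max (pvChain m hm s : Int) (pvRef m hm (s.drop (pvChain m hm s * m.length + 1)))
  else pvRef m hm (s.drop 1)
termination_by s.length
decreasing_by
  · have := List.length_pos_iff.mpr hs; simp only [List.length_drop]; omega
  · have := List.length_pos_iff.mpr hs; simp only [List.length_drop]; omega

theorem pvChain_of_prefix (m : List Char) (hm : m ≠ []) (s : List Char) (h : m <+: s) :
    pvChain m hm s = pvChain m hm (s.drop m.length) + 1 := by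
  rw [pvChain]; simp [h]

theorem pvChain_of_not_prefix (m : List Char) (hm : m ≠ []) (s : List Char) (h : ¬ m <+: s) :
    pvChain m hm s = 0 := by
  rw [pvChain]; simp [h]

theorem pvRef_nil (m : List Char) (hm : m ≠ []) : pvRef m hm [] = 0 := by
  rw [pvRef]; simp

theorem pvRef_of_prefix (m : List Char) (hm : m ≠ []) (s : List Char) (hs : s ≠ []) (h : m <+: s) :
    pvRef m hm s = max (pvChain m hm s : Int) (pvRef m hm (s.drop (pvChain m hm s * m.length + 1))) := by
  conv_lhs => rw [pvRef]
  simp [hs, h]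

theorem pvRef_of_not_prefix (m : List Char) (hm : m ≠ []) (s : List Char) (hs : s ≠ []) (h : ¬ m <+: s) :
    pvRef m hm s = pvRef m hm (s.drop 1) := by
  conv_lhs => rw [pvRef]
  simp [hs, h]

theorem pvChain_mul_le (m : List Char) (hm : m ≠ []) (s : List Char) :
    pvChain m hm s * m.length ≤ s.length := by
  induction s using pvChain.induct m hm with
  | case1 s h ih =>
    rw [pvChain_of_prefix m hm s h]
    have h1 : m.length ≤ s.length := h.length_le
    have h2 : pvChain m hm (s.drop m.length) * m.length ≤ s.length - m.length := by
      simpa using ih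
    rw [Nat.add_mul, Nat.one_mul]
    omega
  | case2 s h =>
    rw [pvChain_of_not_prefix m hm s h]; simp

theorem pvRef_nonneg (m : List Char) (hm : m ≠ []) (s : List Char) : 0 ≤ pvRef m hm s := by
  induction s using pvRef.induct m hm with
  | case1 => rw [pvRef]; simp
  | case2 s hs h ih =>
    rw [pvRef_of_prefix m hm s hs h]
    exact le_max_of_le_left (Int.natCast_nonneg _)
  | case3 s hs h ih =>
    rw [pvRef_of_not_prefix m hm s hs h]
    exact ih

theorem pvRef_step (m : List Char) (hm : m ≠ []) (s : List Char) :
    max (pvChain m hm s : Int) (pvRef m hm (s.drop (pvChain m hm s * m.length + 1))) = pvRef m hm s := by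
  by_cases hs : s = []
  · subst hs
    rw [pvChain_of_not_prefix m hm [] (by simp [hm])]
    simp [pvRef_nil]
  · by_cases h : m <+: s
    · exact (pvRef_of_prefix m hm s hs h).symm
    · rw [pvChain_of_not_prefix m hm s h]
      rw [pvRef_of_not_prefix m hm s hs h]
      simp only [Nat.zero_mul, Nat.zero_add, Nat.cast_zero]
      exact max_eq_right (pvRef_nonneg m hm _)

-- A's loop computes max M (c + chain) vs the reference on the rest.
theorem pvALoop_eq (m : List Char) (hm : m ≠ []) :
    ∀ (fuel : Nat) (s : List Char) (c M : Int) (b : Bool), s.length < fuel → 0 ≤ c → c ≤ M →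
      pvALoop m fuel s c M b
        = max M (max (c + (pvChain m hm s : Int)) (pvRef m hm (s.drop (pvChain m hm s * m.length + 1)))) := by
  intro fuel
  induction fuel with
  | zero => intro s c M b h _ _; exact absurd h (Nat.not_lt_zero _)
  | succ fuel ih =>
    intro s c M b hfuel hc0 hcM
    by_cases hs : s = []
    · subst hs
      rw [pvChain_of_not_prefix m hm [] (by simp [hm])]
      rw [pvALoop]
      simp only [List.length_nil, Nat.lt_irrefl, if_false, List.drop_nil, pvRef_nil,
        Nat.cast_zero, add_zero]
      exact (max_eq_left (max_le hcM (by omega))).symm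
    · have hlen : 0 < s.length := List.length_pos_iff.mpr hs
      have hml : 0 < m.length := List.length_pos_iff.mpr hm
      by_cases h : m <+: s
      · have hb : PySem.Chars.startswith s m = true := (PySem.Chars.startswith_iff s m).mpr h
        rw [pvALoop, if_pos hlen, if_pos hb]
        rw [PySem.List.slice_from_natCast]
        have hd : (s.drop m.length).length < fuel := by
          simp only [List.length_drop]; omega
        rw [ih (s.drop m.length) (c + 1) (max M (c + 1)) true hd (by omega) (le_max_right _ _)]
        rw [pvChain_of_prefix m hm s h]
        rw [List.drop_drop]
        have harith : m.length + (pvChain m hm (s.drop m.length) * m.length + 1)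
            = (pvChain m hm (s.drop m.length) + 1) * m.length + 1 := by ring
        rw [harith]
        push_cast
        generalize pvRef m hm _ = P
        generalize hK : (pvChain m hm (s.drop m.length) : Int) = K
        have hK0 : 0 ≤ K := hK ▸ Int.natCast_nonneg _
        rw [max_assoc]
        have h1 : max (c + 1) (max (c + 1 + K) P) = max (c + 1 + K) P :=
          max_eq_right (le_max_of_le_left (by omega))
        rw [h1]
        have h2 : c + (K + 1) = c + 1 + K := by ring
        rw [h2]
      · have hb : PySem.Chars.startswith s m = false := by
          rw [← Bool.not_eq_true]
          simp [PySem.Chars.startswith_iff, h]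
        rw [pvALoop, if_pos hlen, if_neg (by simp [hb])]
        rw [PySem.List.slice_from_one]
        have hd : s.tail.length < fuel := by
          simp only [List.length_tail]; omega
        rw [ih s.tail 0 (max M c) false hd le_rfl (le_max_of_le_left (hc0.trans hcM))]
        simp only [zero_add, ← List.drop_one]
        rw [pvRef_step m hm (s.drop 1)]
        rw [pvChain_of_not_prefix m hm s h]
        simp only [Nat.zero_mul, Nat.zero_add, Nat.cast_zero, add_zero]
        exact max_assoc M c _

-- B's inner loop counts exactly the chain at j.
theorem pvBChain_eq (m : List Char) (hm : m ≠ []) (s : List Char) :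
    ∀ (fuel : Nat) (j : Nat) (c : Int), s.length - j < fuel →
      pvBChain m fuel s j c
        = (c + (pvChain m hm (s.drop j) : Int), j + pvChain m hm (s.drop j) * m.length) := by
  intro fuel
  induction fuel with
  | zero => intro j c h; exact absurd h (Nat.not_lt_zero _)
  | succ fuel ih =>
    intro j c hfuel
    rw [pvBChain]
    by_cases h : m <+: s.drop j
    · have hcond : PySem.Chars.startswith (s.drop j) m = true :=
        (PySem.Chars.startswith_iff (s.drop j) m).mpr h
      rw [if_pos hcond]
      have hml : 0 < m.length := List.length_pos_iff.mpr hm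
      have hne : s.drop j ≠ [] := by
        intro hnil; rw [hnil] at h; exact hm (List.prefix_nil.mp h)
      have hj : j < s.length := by
        by_contra hcon
        exact hne (List.drop_eq_nil_of_le (by omega))
      rw [ih (j + m.length) (c + 1) (by omega)]
      have hdd : s.drop (j + m.length) = (s.drop j).drop m.length := by rw [List.drop_drop]
      rw [hdd, pvChain_of_prefix m hm (s.drop j) h]
      simp only [Prod.mk.injEq]
      constructor
      · push_cast; ring
      · ring
    · have hcond : ¬ (PySem.Chars.startswith (s.drop j) m = true) := by
        rw [PySem.Chars.startswith_iff]; exact h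
      rw [if_neg hcond]
      rw [pvChain_of_not_prefix m hm (s.drop j) h]
      simp

-- B's outer loop accumulates the reference value of the remaining suffix.
theorem pvBOuter_eq (m : List Char) (hm : m ≠ []) (s : List Char) :
    ∀ (fuel : Nat) (i : Nat) (best : Int), s.length + 1 - i ≤ fuel + 1 → 0 ≤ best →
      pvBOuter m fuel s i best = max best (pvRef m hm (s.drop i)) := by
  intro fuel
  induction fuel with
  | zero =>
    intro i best hfuel hbest
    have hi : s.length ≤ i := by omega
    rw [pvBOuter, List.drop_eq_nil_of_le hi, pvRef_nil]
    exact (max_eq_left hbest).symm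
  | succ fuel ih =>
    intro i best hfuel hbest
    rw [pvBOuter]
    by_cases hi : i < s.length
    · simp only [hi, if_true]
      have hne : s.drop i ≠ [] := by
        intro hnil
        have := List.drop_eq_nil_iff.mp hnil
        omega
      by_cases h : m <+: s.drop i
      · have hcond : PySem.Chars.startswith (s.drop i) m = true :=
        (PySem.Chars.startswith_iff (s.drop i) m).mpr h
        rw [if_pos hcond]
        rw [pvBChain_eq m hm s (s.length + 1) i 0 (by omega)]
        have hml : 0 < m.length := List.length_pos_iff.mpr hm
        have hkle : pvChain m hm (s.drop i) * m.length ≤ s.length - i := by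
          have := pvChain_mul_le m hm (s.drop i)
          simpa using this
        rw [ih (i + pvChain m hm (s.drop i) * m.length + 1)
          (max best (0 + (pvChain m hm (s.drop i) : Int))) (by omega) (le_max_of_le_left hbest)]
        have hdd : s.drop (i + pvChain m hm (s.drop i) * m.length + 1)
            = (s.drop i).drop (pvChain m hm (s.drop i) * m.length + 1) := by
          rw [List.drop_drop, Nat.add_assoc]
        rw [hdd]
        rw [pvRef_of_prefix m hm (s.drop i) hne h]
        simp only [Int.zero_add]
        rw [max_assoc]
      · have hcond : ¬ (PySem.Chars.startswith (s.drop i) m = true) := by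
          rw [PySem.Chars.startswith_iff]; exact h
        rw [if_neg hcond]
        rw [ih (i + 1) best (by omega) hbest]
        have hdd : s.drop (i + 1) = (s.drop i).drop 1 := by rw [List.drop_drop]
        rw [hdd, ← pvRef_of_not_prefix m hm (s.drop i) hne h]
    · simp only [hi, if_false]
      have : s.drop i = [] := List.drop_eq_nil_of_le (by omega)
      rw [this, pvRef_nil]
      exact (max_eq_left hbest).symm

-- ===== VERDICT (by name: the statement is the Claim_ definition above) =====
theorem countLongestSTR_spec : Claim_equal_countLongestSTR := by
  intro s substr _ hpre
  unfold Spec_countLongestSTR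
  by_cases hs : s = ""
  · subst hs
    rfl
  · have hsub : substr ≠ "" := by
      rcases hpre with h | h
      · exact h
      · exact absurd h hs
    have hm : substr.toList ≠ [] := by
      intro h; exact hsub (String.toList_eq_nil_iff.mp h)
    unfold countLongestSTR countLongestSTR_alt
    rw [pvALoop_eq substr.toList hm (s.toList.length + 1) s.toList 0 0 false (by omega) le_rfl le_rfl]
    rw [pvBOuter_eq substr.toList hm s.toList (s.toList.length + 1) 0 0 (by omega) le_rfl]
    simp only [List.drop_zero, Int.zero_add]
    rw [pvRef_step substr.toList hm s.toList]
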